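-- pv_equiv track=rewrite | github.com/jcchuang2/DSC20 | hw08.py | find_two_sums_rec
-- ===== SOURCE A (Python) =====
-- def find_two_sums_rec(main, sub):
--     """
--     # TODO: Add method description and at least 3 new doctests #
--     A function that returns a tuple that contains the sums of the numbers in
--     both main and sub and the sums of the numbers in main that are not in sub.
--     >>> main_seq = [0, 1, 1, 2, 3, 3, 4, 5, 5]
--     >>> find_two_sums_rec(main_seq, [])
--     (0, 24)
--     >>> find_two_sums_rec(main_seq, [1, 2])
--     (4, 20)
--     >>> find_two_sums_rec(main_seq, [3, 4, 5])
--     (20, 4)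
--
--     >>> main_seq_2 = [1, 5, 1, 1, 10]
--     >>> main_seq_3 = []
--     >>> find_two_sums_rec(main_seq_3, [])
--     (0, 0)
--     >>> find_two_sums_rec(main_seq_2, [5, 0, 2])
--     (5, 13)
--     >>> find_two_sums_rec(main_seq_2, main_seq)
--     (8, 10)
--     """
--     # YOUR CODE GOES HERE #
--     if len(main) == 0:
--         return (0, 0)
--     if main[0] in sub:
--         return (main[0] + find_two_sums_rec(main[1:], sub)[0],
--                 find_two_sums_rec(main[1:], sub)[1])
--     return (find_two_sums_rec(main[1:], sub)[0],
--             main[0] + find_two_sums_rec(main[1:], sub)[1])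
-- ===== SOURCE B (Python) =====
-- def find_two_sums_rec(main, sub):
--     sum_in = 0
--     sum_out = 0
--     for x in main:
--         if x in sub:
--             sum_in += x
--         else:
--             sum_out += x
--     return (sum_in, sum_out)
-- ===== Notes on version B (the rewrite author's own statement) =====
-- stated objective: faster
-- what changed: Replaced the recursion on main[1:] (which makes two overlapping recursive calls per element, exponential blow-up) with a single iterative pass keeping two accumulators; the list membership test on sub is kept unchanged.
import Mathlib
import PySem

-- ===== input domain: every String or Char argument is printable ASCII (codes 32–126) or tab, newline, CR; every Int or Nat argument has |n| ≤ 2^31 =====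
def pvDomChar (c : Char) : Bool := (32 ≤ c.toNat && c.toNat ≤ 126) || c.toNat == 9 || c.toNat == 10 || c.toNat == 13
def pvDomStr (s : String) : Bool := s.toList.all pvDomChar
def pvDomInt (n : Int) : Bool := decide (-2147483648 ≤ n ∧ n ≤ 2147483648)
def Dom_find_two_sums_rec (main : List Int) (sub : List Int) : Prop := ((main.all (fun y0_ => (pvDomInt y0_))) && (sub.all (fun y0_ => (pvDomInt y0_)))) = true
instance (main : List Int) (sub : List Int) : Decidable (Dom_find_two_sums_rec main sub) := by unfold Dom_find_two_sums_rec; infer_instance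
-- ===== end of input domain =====

-- B replaces A's doubly-branching recursion with one iterative pass over main keeping two accumulators (asymptotically faster; sub membership test unchanged).


-- ===== PORT A =====
-- literal port of A: two recursive calls per branch, main[1:] is the tail; the tuple is the 2-element list
def find_two_sums_rec (main : List Int) (sub : List Int) : List Int :=
  match main with
  | [] => [0, 0]
  | x :: rest =>
    if sub.contains x then
      [x + (find_two_sums_rec rest sub).getD 0 0, (find_two_sums_rec rest sub).getD 1 0]
    else
      [(find_two_sums_rec rest sub).getD 0 0, x + (find_two_sums_rec rest sub).getD 1 0]

-- ===== PORT B =====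
-- one pass, two accumulators (sum_in, sum_out)
def find_two_sums_rec_alt (main : List Int) (sub : List Int) : List Int :=
  let p := main.foldl
    (fun (acc : Int × Int) x =>
      if sub.contains x then (acc.1 + x, acc.2) else (acc.1, acc.2 + x))
    (0, 0)
  [p.1, p.2]

-- ===== PRECONDITION & SPEC =====
def Spec_find_two_sums_rec (main : List Int) (sub : List Int) (out : List Int) : Prop := out = find_two_sums_rec_alt main sub
instance (main : List Int) (sub : List Int) (out : List Int) : Decidable (Spec_find_two_sums_rec main sub out) := by unfold Spec_find_two_sums_rec; infer_instance

-- ===== CLAIM (what is proved, stated in full; the proofs are below) =====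
def Claim_equal_find_two_sums_rec : Prop := ∀ (main : List Int) (sub : List Int), Dom_find_two_sums_rec main sub → Spec_find_two_sums_rec main sub (find_two_sums_rec main sub)

-- ===== LEMMAS AND PROOFS =====

-- shifting the initial accumulator of B's fold out of the loop
theorem ftsr_foldl_shift (main sub : List Int) (a b : Int) :
    main.foldl (fun (acc : Int × Int) x =>
      if sub.contains x then (acc.1 + x, acc.2) else (acc.1, acc.2 + x)) (a, b)
    = (a + (main.foldl (fun (acc : Int × Int) x =>
        if sub.contains x then (acc.1 + x, acc.2) else (acc.1, acc.2 + x)) (0, 0)).1,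
       b + (main.foldl (fun (acc : Int × Int) x =>
        if sub.contains x then (acc.1 + x, acc.2) else (acc.1, acc.2 + x)) (0, 0)).2) := by
  induction main generalizing a b with
  | nil => simp
  | cons x rest ih =>
    simp only [List.foldl_cons]
    cases h : sub.contains x with
    | true =>
      simp only [h, if_true]
      rw [ih (a + x) b, ih (0 + x) 0]
      simp only [Prod.mk.injEq]
      constructor <;> ring
    | false =>
      simp only [h, Bool.false_eq_true, if_false]
      rw [ih a (b + x), ih 0 (0 + x)]
      simp only [Prod.mk.injEq]
      constructor <;> ring

theorem ftsr_eq (main sub : List Int) :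
    find_two_sums_rec main sub = find_two_sums_rec_alt main sub := by
  induction main with
  | nil => rfl
  | cons x rest ih =>
    cases h : sub.contains x with
    | true =>
      simp only [find_two_sums_rec, find_two_sums_rec_alt, h, if_true, ih, List.foldl_cons]
      rw [ftsr_foldl_shift rest sub (0 + x) 0]
      simp only [find_two_sums_rec_alt, List.getD, List.getElem?_cons_zero,
        List.getElem?_cons_succ, Option.getD_some, List.cons.injEq, and_true]
      constructor <;> ring
    | false =>
      simp only [find_two_sums_rec, find_two_sums_rec_alt, h, Bool.false_eq_true,
        if_false, ih, List.foldl_cons]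
      rw [ftsr_foldl_shift rest sub 0 (0 + x)]
      simp only [find_two_sums_rec_alt, List.getD, List.getElem?_cons_zero,
        List.getElem?_cons_succ, Option.getD_some, List.cons.injEq, and_true]
      constructor <;> ring

-- ===== VERDICT (by name: the statement is the Claim_ definition above) =====
theorem find_two_sums_rec_spec : Claim_equal_find_two_sums_rec := by
  intro main sub _
  exact ftsr_eq main sub
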